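-- pv_equiv track=rewrite | github.com/fizban99/micropython-usunfish | usunfish_gmv.py | rq_mobility
-- ===== SOURCE A (Python) =====
-- def rq_mobility(r_file, q_file, enemy_pawns, own_pawns, pf2, sop_r, sop_q, op_r, op_q):
--     pf1 = enemy_pawns & (0xFF ^ own_pawns)
--
--     s_op = r_file & pf1
--     op = r_file & pf2
--     m = sum((s_op >> k) & 1 for k in range(8)) * sop_r
--     m += sum((op >> k) & 1 for k in range(8)) * op_r
--
--     s_op = q_file & pf1
--     op = q_file & pf2
--     m += sum((s_op >> k) & 1 for k in range(8)) * sop_q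
--     m += sum((op >> k) & 1 for k in range(8)) * op_q
--     return m
-- ===== SOURCE B (Python) =====
-- POPCNT = [bin(i).count("1") for i in range(256)]
--
--
-- def rq_mobility(r_file, q_file, enemy_pawns, own_pawns, pf2, sop_r, sop_q, op_r, op_q):
--     pf1 = enemy_pawns & (0xFF ^ own_pawns)
--     return (POPCNT[r_file & pf1 & 0xFF] * sop_r
--             + POPCNT[r_file & pf2 & 0xFF] * op_r
--             + POPCNT[q_file & pf1 & 0xFF] * sop_q
--             + POPCNT[q_file & pf2 & 0xFF] * op_q)
-- ===== Notes on version B (the rewrite author's own statement) =====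
-- stated objective: idiomatic
-- what changed: Replaces the four per-bit generator sums over range(8) with direct indexing into a precomputed 256-entry popcount lookup table, masking each value with & 0xFF.
import Mathlib
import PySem

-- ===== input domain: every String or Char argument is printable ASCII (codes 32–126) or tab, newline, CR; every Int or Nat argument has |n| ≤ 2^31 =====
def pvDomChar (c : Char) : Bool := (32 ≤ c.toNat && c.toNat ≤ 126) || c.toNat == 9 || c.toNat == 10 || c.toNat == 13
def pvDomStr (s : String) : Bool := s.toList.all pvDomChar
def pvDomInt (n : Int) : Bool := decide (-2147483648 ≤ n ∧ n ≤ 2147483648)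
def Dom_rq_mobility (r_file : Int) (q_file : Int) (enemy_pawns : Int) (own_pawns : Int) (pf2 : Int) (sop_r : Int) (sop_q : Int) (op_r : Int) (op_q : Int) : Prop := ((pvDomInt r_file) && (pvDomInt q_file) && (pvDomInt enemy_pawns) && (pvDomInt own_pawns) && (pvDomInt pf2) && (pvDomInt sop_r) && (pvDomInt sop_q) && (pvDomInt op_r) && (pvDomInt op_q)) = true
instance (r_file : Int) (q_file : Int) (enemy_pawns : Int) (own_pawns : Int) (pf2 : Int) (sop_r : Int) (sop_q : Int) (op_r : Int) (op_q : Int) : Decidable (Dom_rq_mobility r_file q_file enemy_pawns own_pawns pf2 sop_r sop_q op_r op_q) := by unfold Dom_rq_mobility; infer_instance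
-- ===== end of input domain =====

-- B replaces A's four per-bit sums over range(8) with lookups in a precomputed 256-entry
-- popcount table indexed by the masked value (& 0xFF): same result, more idiomatic.

-- ===== PORT A =====
def rq_mobility (r_file : Int) (q_file : Int) (enemy_pawns : Int) (own_pawns : Int) (pf2 : Int) (sop_r : Int) (sop_q : Int) (op_r : Int) (op_q : Int) : Int :=
  let pf1 := PySem.Int.band enemy_pawns (PySem.Int.bxor 255 own_pawns)
  let s_op := PySem.Int.band r_file pf1
  let op := PySem.Int.band r_file pf2
  let m := ((List.range 8).map (fun (k : Nat) => PySem.Int.band (s_op >>> k) 1)).sum * sop_r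
  let m := m + ((List.range 8).map (fun (k : Nat) => PySem.Int.band (op >>> k) 1)).sum * op_r
  let s_op := PySem.Int.band q_file pf1
  let op := PySem.Int.band q_file pf2
  let m := m + ((List.range 8).map (fun (k : Nat) => PySem.Int.band (s_op >>> k) 1)).sum * sop_q
  let m := m + ((List.range 8).map (fun (k : Nat) => PySem.Int.band (op >>> k) 1)).sum * op_q
  m

-- ===== PORT B =====
-- POPCNT = [i.bit_count() for i in range(256)]
def POPCNT : List Int :=
  (PySem.List.pyRange 0 256 1).map (fun i => ((PySem.Int.bitCount i : Nat) : Int))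

def rq_mobility_alt (r_file : Int) (q_file : Int) (enemy_pawns : Int) (own_pawns : Int) (pf2 : Int) (sop_r : Int) (sop_q : Int) (op_r : Int) (op_q : Int) : Int :=
  let pf1 := PySem.Int.band enemy_pawns (PySem.Int.bxor 255 own_pawns)
  PySem.List.pyGetD POPCNT (PySem.Int.band (PySem.Int.band r_file pf1) 255) 0 * sop_r
    + PySem.List.pyGetD POPCNT (PySem.Int.band (PySem.Int.band r_file pf2) 255) 0 * op_r
    + PySem.List.pyGetD POPCNT (PySem.Int.band (PySem.Int.band q_file pf1) 255) 0 * sop_q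
    + PySem.List.pyGetD POPCNT (PySem.Int.band (PySem.Int.band q_file pf2) 255) 0 * op_q

-- ===== PRECONDITION & SPEC =====
def Spec_rq_mobility (r_file : Int) (q_file : Int) (enemy_pawns : Int) (own_pawns : Int) (pf2 : Int) (sop_r : Int) (sop_q : Int) (op_r : Int) (op_q : Int) (out : Int) : Prop := out = rq_mobility_alt r_file q_file enemy_pawns own_pawns pf2 sop_r sop_q op_r op_q
instance (r_file : Int) (q_file : Int) (enemy_pawns : Int) (own_pawns : Int) (pf2 : Int) (sop_r : Int) (sop_q : Int) (op_r : Int) (op_q : Int) (out : Int) : Decidable (Spec_rq_mobility r_file q_file enemy_pawns own_pawns pf2 sop_r sop_q op_r op_q out) := by unfold Spec_rq_mobility; infer_instance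

-- ===== CLAIM (what is proved, stated in full; the proofs are below) =====
def Claim_equal_rq_mobility : Prop := ∀ (r_file : Int) (q_file : Int) (enemy_pawns : Int) (own_pawns : Int) (pf2 : Int) (sop_r : Int) (sop_q : Int) (op_r : Int) (op_q : Int), Dom_rq_mobility r_file q_file enemy_pawns own_pawns pf2 sop_r sop_q op_r op_q → Spec_rq_mobility r_file q_file enemy_pawns own_pawns pf2 sop_r sop_q op_r op_q (rq_mobility r_file q_file enemy_pawns own_pawns pf2 sop_r sop_q op_r op_q)

-- ===== LEMMAS AND PROOFS =====

-- x & 0xFF is x mod 256 (Python/Euclidean mod agree: the divisor is positive).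
theorem pv_band_255 (x : Int) : PySem.Int.band x 255 = x % 256 := by
  unfold PySem.Int.band
  have h8 : ∀ m : Nat, m &&& 255 = m % 256 := fun m => Nat.and_two_pow_sub_one_eq_mod m 8
  have ht : (255 : Int).toNat = 255 := rfl
  split_ifs with h1 h2 h2
  · rw [ht]; have := h8 x.toNat; omega
  · omega
  · rw [ht]
    have : 255 &&& (-x - 1).toNat = (-x - 1).toNat % 256 := by
      rw [Nat.land_comm]; exact h8 _
    omega
  · omega

-- Python's a % 2 (PySem.Int.mod, floor mod) is Euclidean mod for the positive divisor 2
theorem pv_mod_two (a : Int) : PySem.Int.mod a 2 = a % 2 := by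
  simp [PySem.Int.mod, Int.fmod_eq_emod]

-- reading the 256-entry table at index n < 256 gives bit_count(n)
theorem pv_lookup (n : Nat) (h : n < 256) :
    PySem.List.pyGetD POPCNT (n : Int) 0 = ((PySem.Int.bitCount (n : Int) : Nat) : Int) := by
  have := PySem.List.pyGetD_map_pyRange (fun i => ((PySem.Int.bitCount i : Nat) : Int)) 256 n 0 h
  unfold POPCNT
  exact_mod_cast this

-- bit_count of an 8-bit value, written as divisions mod 2 (checked over all 256 values)
set_option maxRecDepth 4096 in
theorem pv_bitCount_fin : ∀ n : Fin 256, ((PySem.Int.bitCount ((n : Nat) : Int) : Nat) : Int) =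
    ((n % 2 + n / 2 % 2 + n / 4 % 2 + n / 8 % 2 + n / 16 % 2 + n / 32 % 2 + n / 64 % 2
        + (n : Nat) / 128 % 2 : Nat) : Int) := by decide

theorem pv_bitCount (n : Nat) (h : n < 256) : ((PySem.Int.bitCount (n : Int) : Nat) : Int) =
    ((n % 2 + n / 2 % 2 + n / 4 % 2 + n / 8 % 2 + n / 16 % 2 + n / 32 % 2 + n / 64 % 2
        + n / 128 % 2 : Nat) : Int) := pv_bitCount_fin ⟨n, h⟩

-- A's per-bit sum over range(8) equals B's table lookup at the masked index
theorem pv_bitsum (x : Int) :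
    ((List.range 8).map (fun (k : Nat) => PySem.Int.band (x >>> k) 1)).sum =
      PySem.List.pyGetD POPCNT (PySem.Int.band x 255) 0 := by
  rw [pv_band_255]
  have h0 : (0:Int) ≤ x % 256 := Int.emod_nonneg x (by norm_num)
  have h1 : x % 256 < 256 := Int.emod_lt_of_pos x (by norm_num)
  have hc : x % 256 = (((x % 256).toNat : Nat) : Int) := by omega
  rw [hc, pv_lookup _ (by omega), pv_bitCount _ (by omega)]
  have hr : List.range 8 = [0, 1, 2, 3, 4, 5, 6, 7] := rfl
  rw [hr]
  simp only [List.map_cons, List.map_nil, List.sum_cons, List.sum_nil, PySem.Int.band_one,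
    pv_mod_two]
  have e0 : x >>> (0 : Nat) = x / 1 := by rw [Int.shiftRight_eq_div_pow]; norm_num
  have e1 : x >>> (1 : Nat) = x / 2 := by rw [Int.shiftRight_eq_div_pow]; norm_num
  have e2 : x >>> (2 : Nat) = x / 4 := by rw [Int.shiftRight_eq_div_pow]; norm_num
  have e3 : x >>> (3 : Nat) = x / 8 := by rw [Int.shiftRight_eq_div_pow]; norm_num
  have e4 : x >>> (4 : Nat) = x / 16 := by rw [Int.shiftRight_eq_div_pow]; norm_num
  have e5 : x >>> (5 : Nat) = x / 32 := by rw [Int.shiftRight_eq_div_pow]; norm_num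
  have e6 : x >>> (6 : Nat) = x / 64 := by rw [Int.shiftRight_eq_div_pow]; norm_num
  have e7 : x >>> (7 : Nat) = x / 128 := by rw [Int.shiftRight_eq_div_pow]; norm_num
  rw [e0, e1, e2, e3, e4, e5, e6, e7]
  have f0 : x / 1 % 2 = (((x % 256).toNat % 2 : Nat) : Int) := by omega
  have f1 : x / 2 % 2 = (((x % 256).toNat / 2 % 2 : Nat) : Int) := by omega
  have f2 : x / 4 % 2 = (((x % 256).toNat / 4 % 2 : Nat) : Int) := by omega
  have f3 : x / 8 % 2 = (((x % 256).toNat / 8 % 2 : Nat) : Int) := by omega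
  have f4 : x / 16 % 2 = (((x % 256).toNat / 16 % 2 : Nat) : Int) := by omega
  have f5 : x / 32 % 2 = (((x % 256).toNat / 32 % 2 : Nat) : Int) := by omega
  have f6 : x / 64 % 2 = (((x % 256).toNat / 64 % 2 : Nat) : Int) := by omega
  have f7 : x / 128 % 2 = (((x % 256).toNat / 128 % 2 : Nat) : Int) := by omega
  rw [f0, f1, f2, f3, f4, f5, f6, f7]
  push_cast
  ring

theorem rq_mobility_eq_alt (r_file q_file enemy_pawns own_pawns pf2 sop_r sop_q op_r op_q : Int) :
    rq_mobility r_file q_file enemy_pawns own_pawns pf2 sop_r sop_q op_r op_q =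
      rq_mobility_alt r_file q_file enemy_pawns own_pawns pf2 sop_r sop_q op_r op_q := by
  unfold rq_mobility rq_mobility_alt
  simp only [pv_bitsum]

-- ===== VERDICT (by name: the statement is the Claim_ definition above) =====
theorem rq_mobility_spec : Claim_equal_rq_mobility := by
  intro r_file q_file enemy_pawns own_pawns pf2 sop_r sop_q op_r op_q _
  unfold Spec_rq_mobility
  exact rq_mobility_eq_alt r_file q_file enemy_pawns own_pawns pf2 sop_r sop_q op_r op_q
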